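-- pv_equiv track=rewrite | github.com/Seunghyun0606/algorithm | 과거풀이/라인/라인 2021 1번.py | solution
-- ===== SOURCE A (Python) =====
-- from collections import defaultdict
--
-- def solution(boxes):
--     answer = -1
--
--     len_boxes = len(boxes)
--     items = defaultdict(int)
--
--     for box in boxes:
--         for item in box:
--             items[item] += 1
--
--     new_items = list(items.values())
--
--     count = 0
--     for item in new_items:
--         temp = item // 2
--         if temp:
--             count += temp
--
--     if len_boxes > count:
--         answer = len_boxes - count
--     else:
--         answer = 0
--
--     return answer
-- ===== SOURCE B (Python) =====
-- def solution(boxes):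
--     # Count pairs without any frequency table: keep the set of items seen an
--     # odd number of times (toggle membership); pairs = (total - odd)/2.
--     odd = set()
--     total = 0
--     for box in boxes:
--         for item in box:
--             total += 1
--             if item in odd:
--                 odd.remove(item)
--             else:
--                 odd.add(item)
--     pairs = (total - len(odd)) // 2
--     return len(boxes) - pairs if len(boxes) > pairs else 0
-- ===== Notes on version B (the rewrite author's own statement) =====
-- stated objective: alternative
-- what changed: B keeps no frequency table at all: it maintains only the set of items currently seen an odd number of times (toggling membership per occurrence) and a running total, and derives the pair count as (total - |odd set|) // 2, replacing A's defaultdict histogram plus a second pass over its values.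
import Mathlib
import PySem

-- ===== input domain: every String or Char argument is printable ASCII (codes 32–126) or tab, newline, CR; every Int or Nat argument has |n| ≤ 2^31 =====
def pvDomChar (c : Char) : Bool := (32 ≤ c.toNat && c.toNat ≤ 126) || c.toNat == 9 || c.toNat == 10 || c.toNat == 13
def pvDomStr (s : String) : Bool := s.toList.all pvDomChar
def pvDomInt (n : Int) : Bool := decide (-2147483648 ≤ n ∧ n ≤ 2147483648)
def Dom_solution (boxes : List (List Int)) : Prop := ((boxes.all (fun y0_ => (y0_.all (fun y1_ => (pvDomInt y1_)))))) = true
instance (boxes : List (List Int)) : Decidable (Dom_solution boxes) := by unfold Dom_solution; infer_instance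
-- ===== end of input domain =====

-- B keeps no frequency table: a parity set (items seen an odd number of times) and a running
-- total, pairs = (total - |odd|) // 2; objective: alternative algorithm, no speed claim.

-- ===== PORT A =====
def solution (boxes : List (List Int)) : Int :=
  let lenBoxes : Int := PySem.List.len boxes
  let items : PySem.Dict Int Int :=
    boxes.foldl (fun d box => box.foldl (fun d item => d.modify item 0 (· + 1)) d) PySem.Dict.empty
  let newItems : List Int := items.values
  let count : Int := newItems.foldl (fun c item =>
    let temp := PySem.Int.floordiv item 2
    if temp ≠ 0 then c + temp else c) 0
  if lenBoxes > count then lenBoxes - count else 0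

-- ===== PORT B =====
def parityStep (st : PySem.Set Int × Int) (item : Int) : PySem.Set Int × Int :=
  let t := st.2 + 1
  if PySem.Set.contains st.1 item then (PySem.Set.discard st.1 item, t)
  else (PySem.Set.add st.1 item, t)

def solution_alt (boxes : List (List Int)) : Int :=
  let st := boxes.foldl (fun st box => box.foldl parityStep st) (PySem.Set.empty, 0)
  let pairs := PySem.Int.floordiv (st.2 - PySem.Set.len st.1) 2
  if PySem.List.len boxes > pairs then PySem.List.len boxes - pairs else 0

-- ===== PRECONDITION & SPEC =====
def Spec_solution (boxes : List (List Int)) (out : Int) : Prop := out = solution_alt boxes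
instance (boxes : List (List Int)) (out : Int) : Decidable (Spec_solution boxes out) := by unfold Spec_solution; infer_instance

-- ===== CLAIM (what is proved, stated in full; the proofs are below) =====
def Claim_equal_solution : Prop := ∀ (boxes : List (List Int)), Dom_solution boxes → Spec_solution boxes (solution boxes)

-- ===== LEMMAS AND PROOFS =====

-- the common value both programs compute: Σ over distinct items of (frequency // 2)
def pairSum (ys : List Int) : Int :=
  ((PySem.Set.ofList ys).map (fun k => ((ys.count k / 2 : Nat) : Int))).sum

lemma countA_eq_sum (vs : List Int) (c : Int) :
    vs.foldl (fun c item =>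
      let temp := PySem.Int.floordiv item 2
      if temp ≠ 0 then c + temp else c) c
      = c + (vs.map (fun v => PySem.Int.floordiv v 2)).sum := by
  induction vs generalizing c with
  | nil => simp
  | cons v vs ih =>
    simp only [List.foldl_cons, List.map_cons, List.sum_cons, ih]
    have hstep : (if PySem.Int.floordiv v 2 ≠ 0 then c + PySem.Int.floordiv v 2 else c)
        = c + PySem.Int.floordiv v 2 := by
      split_ifs with h
      · rfl
      · simp only [not_not] at h; rw [h]; ring
    rw [hstep]; ring

lemma pairSum_append (ys : List Int) (x : Int) :
    pairSum (ys ++ [x])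
      = pairSum ys + (if (ys.count x + 1) % 2 = 0 then 1 else 0) := by
  by_cases hx : x ∈ ys
  · have hxS : x ∈ PySem.Set.ofList ys := (PySem.Set.mem_ofList ys x).2 hx
    have hperm : (PySem.Set.ofList ys).Perm (x :: (PySem.Set.ofList ys).erase x) :=
      List.perm_cons_erase hxS
    have hnd : (PySem.Set.ofList ys).Nodup := PySem.Set.nodup_ofList ys
    have hset : PySem.Set.ofList (ys ++ [x]) = PySem.Set.ofList ys := by
      rw [PySem.Set.ofList_append_singleton, PySem.Set.add_of_mem hxS]
    have hne : ∀ k ∈ (PySem.Set.ofList ys).erase x, k ≠ x := by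
      intro k hk
      exact (List.Nodup.mem_erase_iff hnd |>.1 hk).1
    have hcount : ∀ k : Int, (ys ++ [x]).count k = ys.count k + (if x = k then 1 else 0) := by
      intro k; simp [List.count_append, List.count_singleton']
    have hsum : ∀ (f : Int → Int),
        ((PySem.Set.ofList ys).map f).sum = f x + (((PySem.Set.ofList ys).erase x).map f).sum := by
      intro f
      have := (hperm.map f).sum_eq
      simpa using this
    unfold pairSum
    rw [hset, hsum, hsum]
    have hcongr : (((PySem.Set.ofList ys).erase x).map
        (fun k => (((ys ++ [x]).count k / 2 : Nat) : Int)))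
        = (((PySem.Set.ofList ys).erase x).map (fun k => ((ys.count k / 2 : Nat) : Int))) := by
      apply List.map_congr_left
      intro k hk
      have : ¬ (x = k) := fun h => hne k hk h.symm
      simp [hcount k, this]
    rw [hcongr]
    rw [show (ys ++ [x]).count x = ys.count x + 1 from by simp [List.count_append]]
    have key : (((ys.count x + 1) / 2 : Nat) : Int)
        = ((ys.count x / 2 : Nat) : Int) + (if (ys.count x + 1) % 2 = 0 then 1 else 0) := by
      by_cases hpar : (ys.count x + 1) % 2 = 0
      · have h2 : (ys.count x + 1) / 2 = ys.count x / 2 + 1 := by omega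
        rw [h2, if_pos hpar]; push_cast; ring
      · have h2 : (ys.count x + 1) / 2 = ys.count x / 2 := by omega
        rw [h2, if_neg hpar]; ring
    rw [key]; ring
  · have hxS : x ∉ PySem.Set.ofList ys := fun h => hx ((PySem.Set.mem_ofList ys x).1 h)
    have hset : PySem.Set.ofList (ys ++ [x]) = PySem.Set.ofList ys ++ [x] := by
      rw [PySem.Set.ofList_append_singleton, PySem.Set.add_of_not_mem hxS]
    have hc0 : ys.count x = 0 := List.count_eq_zero.2 hx
    unfold pairSum
    rw [hset, List.map_append, List.sum_append]
    have hcongr : ((PySem.Set.ofList ys).map (fun k => (((ys ++ [x]).count k / 2 : Nat) : Int)))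
        = ((PySem.Set.ofList ys).map (fun k => ((ys.count k / 2 : Nat) : Int))) := by
      apply List.map_congr_left
      intro k hk
      have hkx : ¬ (x = k) := by
        intro h; exact hxS (h ▸ hk)
      simp [List.count_append, hkx]
    rw [hcongr]
    simp only [List.map_cons, List.map_nil, List.sum_cons, List.sum_nil, add_zero]
    rw [show (ys ++ [x]).count x = 1 from by simp [List.count_append, hc0]]
    rw [hc0]
    norm_num

-- invariant of B's fold: total = length, the set holds exactly the odd-frequency items,
-- is duplicate-free, and total - |set| = 2 * pairSum
lemma parity_inv (ys : List Int) :
    (ys.foldl parityStep (PySem.Set.empty, 0)).2 = (ys.length : Int)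
    ∧ (ys.foldl parityStep (PySem.Set.empty, 0)).1.Nodup
    ∧ (∀ k, k ∈ (ys.foldl parityStep (PySem.Set.empty, 0)).1 ↔ ys.count k % 2 = 1)
    ∧ ((ys.length : Int) - ((ys.foldl parityStep (PySem.Set.empty, 0)).1.length : Int)
        = 2 * pairSum ys) := by
  induction ys using List.reverseRecOn with
  | nil =>
    refine ⟨rfl, List.nodup_nil, ?_, by simp [pairSum, PySem.Set.ofList]⟩
    intro k; simp [PySem.Set.empty]
  | append_singleton ys x ih =>
    obtain ⟨ht, hnd, hmem, hlen⟩ := ih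
    rw [List.foldl_append, List.foldl_cons, List.foldl_nil]
    set st := ys.foldl parityStep (PySem.Set.empty, 0) with hst
    have hcnt : ∀ k : Int, (ys ++ [x]).count k = ys.count k + (if x = k then 1 else 0) := by
      intro k; simp [List.count_append, List.count_singleton']
    by_cases hx : x ∈ st.1
    · -- x had odd count: toggle it out, pairSum grows by 1
      have hxodd : ys.count x % 2 = 1 := (hmem x).1 hx
      have hstep : parityStep st x = (PySem.Set.discard st.1 x, st.2 + 1) := by
        simp [parityStep, hx]
      have hps : pairSum (ys ++ [x]) = pairSum ys + 1 := by
        rw [pairSum_append]; rw [if_pos (by omega)]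
      have hdisc : List.Perm (PySem.Set.discard st.1 x) (st.1.erase x) := by
        apply (List.perm_ext_iff_of_nodup (PySem.Set.nodup_discard st.1 x hnd) (hnd.erase x)).2
        intro a
        rw [PySem.Set.mem_discard, List.Nodup.mem_erase_iff hnd]
        tauto
      have hlen' : (PySem.Set.discard st.1 x).length = st.1.length - 1 := by
        rw [hdisc.length_eq, List.length_erase_of_mem hx]
      have hlpos : 1 ≤ st.1.length := List.length_pos_of_mem hx
      rw [hstep]
      refine ⟨by simp [ht], PySem.Set.nodup_discard st.1 x hnd, ?_, ?_⟩
      · intro k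
        simp only [PySem.Set.mem_discard, hmem k, hcnt k]
        by_cases hk : x = k
        · subst hk; simp; omega
        · have hkx : ¬ (k = x) := fun h => hk h.symm
          simp [hk, hkx]
      · simp only [hlen', hps, List.length_append, List.length_singleton]
        push_cast [Nat.cast_sub hlpos]
        linarith [hlen]
    · -- x had even count: toggle it in, pairSum unchanged
      have hxe0 : ys.count x % 2 = 0 := by
        rcases Nat.mod_two_eq_zero_or_one (ys.count x) with h | h
        · exact h
        · exact absurd ((hmem x).2 h) hx
      have hstep : parityStep st x = (st.1 ++ [x], st.2 + 1) := by
        simp [parityStep, hx]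
      have hps : pairSum (ys ++ [x]) = pairSum ys := by
        rw [pairSum_append, if_neg (by omega)]; ring
      rw [hstep]
      refine ⟨by simp [ht], ?_, ?_, ?_⟩
      · exact List.Nodup.append hnd (List.nodup_singleton x)
          (by intro a ha hb'; simp at hb'; exact hx (hb' ▸ ha))
      · intro k
        simp only [List.mem_append, List.mem_singleton, hcnt k]
        by_cases hk : x = k
        · subst hk; simp [hx]; omega
        · have hkx : ¬ (k = x) := fun h => hk h.symm
          simp [hk, hkx, hmem k]
      · simp only [hps, List.length_append, List.length_singleton]
        push_cast
        linarith [hlen]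

lemma valuesA (F : List Int) :
    (F.foldl (fun d item => d.modify item 0 (· + 1)) PySem.Dict.empty).values
      = (PySem.Set.ofList F).map (fun k => (F.count k : Int)) := by
  rw [← PySem.Dict.counter_eq_foldl]
  simp only [PySem.Dict.values, PySem.Dict.items_counter, List.map_map]
  rfl

-- ===== VERDICT (by name: the statement is the Claim_ definition above) =====
theorem solution_spec : Claim_equal_solution := by
  intro boxes _
  unfold Spec_solution solution solution_alt
  rw [← List.foldl_flatten, ← List.foldl_flatten (f := parityStep)]
  obtain ⟨ht, _, _, hlen⟩ := parity_inv boxes.flatten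
  simp only [valuesA, countA_eq_sum, List.map_map, zero_add]
  have hA : ((PySem.Set.ofList boxes.flatten).map
      ((fun v => PySem.Int.floordiv v 2) ∘ fun k => (boxes.flatten.count k : Int))).sum
      = pairSum boxes.flatten := by
    unfold pairSum
    apply congrArg
    apply List.map_congr_left
    intro k _
    simp only [Function.comp]
    exact_mod_cast PySem.Int.floordiv_natCast (boxes.flatten.count k) 2
  have hB : PySem.Int.floordiv
      ((boxes.flatten.foldl parityStep (PySem.Set.empty, 0)).2
        - PySem.Set.len (boxes.flatten.foldl parityStep (PySem.Set.empty, 0)).1) 2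
      = pairSum boxes.flatten := by
    have hset : ((boxes.flatten.foldl parityStep (PySem.Set.empty, 0)).2
        - PySem.Set.len (boxes.flatten.foldl parityStep (PySem.Set.empty, 0)).1)
        = 2 * pairSum boxes.flatten := by
      rw [ht]
      simpa [PySem.Set.len] using hlen
    rw [hset, PySem.Int.floordiv_eq_ediv_of_pos (by norm_num)]
    omega
  rw [hA, hB]
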